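-- pv_equiv track=rewrite | github.com/hunny123/Python-cpcode | codeforces/CF677-D2-A.py | findwidth
-- ===== SOURCE A (Python) =====
-- def findwidth(n,h):
--     sum1=0
--     i=0
--     while i<len(n):
--
--         if(n[i]>h):
--             sum1 = sum1+2
--         else:
--             sum1 = sum1+1
--         i=i+1
--     return sum1
-- ===== SOURCE B (Python) =====
-- def findwidth(n, h):
--     # Sort, then binary-search for the boundary between widths 1 and 2:
--     # every element <= h contributes 1, every element > h contributes 2,
--     # so the answer is 2*len(n) minus the number of elements <= h.
--     a = sorted(n)
--     lo, hi = 0, len(a)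
--     while lo < hi:
--         mid = (lo + hi) // 2
--         if a[mid] <= h:
--             lo = mid + 1
--         else:
--             hi = mid
--     return 2 * len(a) - lo
-- ===== Notes on version B (the rewrite author's own statement) =====
-- stated objective: alternative
-- what changed: Replaces A's single-pass 1-or-2 accumulator with sort-then-binary-search: sort n, binary-search the boundary index of elements <= h, and return 2*len(n) minus that index.
import Mathlib
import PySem

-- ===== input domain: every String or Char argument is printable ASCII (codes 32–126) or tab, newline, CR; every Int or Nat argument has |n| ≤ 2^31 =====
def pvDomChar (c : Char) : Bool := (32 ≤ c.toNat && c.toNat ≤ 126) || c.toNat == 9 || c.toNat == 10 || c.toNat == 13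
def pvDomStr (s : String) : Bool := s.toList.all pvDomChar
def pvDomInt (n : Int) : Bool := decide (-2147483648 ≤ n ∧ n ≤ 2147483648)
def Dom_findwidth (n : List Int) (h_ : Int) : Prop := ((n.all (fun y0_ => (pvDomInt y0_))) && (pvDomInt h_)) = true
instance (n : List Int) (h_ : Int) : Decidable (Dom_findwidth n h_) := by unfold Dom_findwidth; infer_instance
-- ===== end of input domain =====

-- B replaces A's single-pass 1-or-2 accumulator with sort + binary search for the boundary of elements ≤ h (alternative algorithm).

-- ===== PORT A =====
-- while i < len(n): accumulate 2 or 1; structural recursion over the remaining suffix carries the same state.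
def findwidthLoop (xs : List Int) (h_ : Int) (sum1 : Int) : Int :=
  match xs with
  | [] => sum1
  | x :: rest => findwidthLoop rest h_ (if x > h_ then sum1 + 2 else sum1 + 1)

def findwidth (n : List Int) (h_ : Int) : Int := findwidthLoop n h_ 0

-- ===== PORT B =====
-- while lo < hi: mid = (lo+hi)//2; if a[mid] <= h: lo = mid+1 else hi = mid.
-- a[mid] is always in range (lo ≤ mid < hi ≤ len a), so getD is exact here.
-- fuel = len(a) bounds the number of iterations (hi - lo shrinks every step).
def bsLoop (a : List Int) (h_ : Int) : Nat → Nat → Nat → Nat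
  | 0, lo, _ => lo
  | fuel + 1, lo, hi =>
    if lo < hi then
      let mid := (lo + hi) / 2
      if a.getD mid 0 ≤ h_ then bsLoop a h_ fuel (mid + 1) hi else bsLoop a h_ fuel lo mid
    else lo

def findwidth_alt (n : List Int) (h_ : Int) : Int :=
  let a := PySem.List.sorted n (fun x => x) false
  let lo := bsLoop a h_ a.length 0 a.length
  2 * (a.length : Int) - (lo : Int)

-- ===== PRECONDITION & SPEC =====
def Spec_findwidth (n : List Int) (h_ : Int) (out : Int) : Prop := out = findwidth_alt n h_
instance (n : List Int) (h_ : Int) (out : Int) : Decidable (Spec_findwidth n h_ out) := by unfold Spec_findwidth; infer_instance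

-- ===== CLAIM (what is proved, stated in full; the proofs are below) =====
def Claim_equal_findwidth : Prop := ∀ (n : List Int) (h_ : Int), Dom_findwidth n h_ → Spec_findwidth n h_ (findwidth n h_)

-- ===== LEMMAS AND PROOFS =====
theorem findwidthLoop_eq (xs : List Int) (h_ : Int) (s : Int) :
    findwidthLoop xs h_ s = s + (xs.length : Int) + ((xs.filter (fun x => h_ < x)).length : Int) := by
  induction xs generalizing s with
  | nil => simp [findwidthLoop]
  | cons x rest ih =>
    simp only [findwidthLoop, List.length_cons, List.filter_cons]
    rw [ih]
    by_cases hx : x > h_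
    · simp [hx, gt_iff_lt]; ring
    · simp [hx]; ring

-- binary-search invariant: bsLoop lands on the boundary between elements ≤ h_ and elements > h_
theorem bsLoop_spec (a : List Int) (h_ : Int) (hs : a.Pairwise (· ≤ ·)) :
    ∀ (fuel lo hi : Nat), hi - lo ≤ fuel → hi ≤ a.length → lo ≤ hi →
    (∀ j (hj : j < a.length), j < lo → a[j] ≤ h_) →
    (∀ j (hj : j < a.length), hi ≤ j → h_ < a[j]) →
    (∀ j (hj : j < a.length), j < bsLoop a h_ fuel lo hi → a[j] ≤ h_) ∧
    (∀ j (hj : j < a.length), bsLoop a h_ fuel lo hi ≤ j → h_ < a[j]) ∧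
    bsLoop a h_ fuel lo hi ≤ a.length := by
  have mono : ∀ i j (hi' : i < a.length) (hj : j < a.length), i ≤ j → a[i] ≤ a[j] := by
    intro i j hi' hj hij
    rcases Nat.eq_or_lt_of_le hij with h | h
    · subst h; exact le_refl _
    · exact (List.pairwise_iff_getElem.mp hs) i j hi' hj h
  intro fuel
  induction fuel with
  | zero =>
    intro lo hi hk hhi hlh hlow hhigh
    have : lo = hi := by omega
    subst this
    simp only [bsLoop]
    exact ⟨hlow, fun j hj hjge => hhigh j hj hjge, by omega⟩
  | succ fuel ih =>
    intro lo hi hk hhi hlh hlow hhigh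
    rw [bsLoop]
    by_cases hlt : lo < hi
    · simp only [hlt, if_true]
      have hmid1 : lo ≤ (lo + hi) / 2 := by omega
      have hmid2 : (lo + hi) / 2 < hi := by omega
      have hmlen : (lo + hi) / 2 < a.length := by omega
      rw [List.getD_eq_getElem _ _ hmlen]
      by_cases hle : a[(lo + hi) / 2] ≤ h_
      · simp only [hle, if_true]
        refine ih _ _ (by omega) hhi (by omega) ?_ hhigh
        intro j hj hjlt
        exact le_trans (mono j _ hj hmlen (by omega)) hle
      · simp only [hle, if_false]
        refine ih _ _ (by omega) (by omega) (by omega) hlow ?_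
        intro j hj hjge
        exact lt_of_lt_of_le (lt_of_not_ge hle) (mono _ j hmlen hj hjge)
    · simp only [hlt, if_false]
      have : lo = hi := by omega
      subst this
      exact ⟨hlow, fun j hj hjge => hhigh j hj hjge, by omega⟩

theorem boundary_filter_len (a : List Int) (h_ : Int) (r : Nat) (hr : r ≤ a.length)
    (hlow : ∀ j (hj : j < a.length), j < r → a[j] ≤ h_)
    (hhigh : ∀ j (hj : j < a.length), r ≤ j → h_ < a[j]) :
    ((a.filter (fun x => x ≤ h_)).length) = r := by
  have hsplit : a = a.take r ++ a.drop r := (List.take_append_drop r a).symm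
  have htake : (a.take r).filter (fun x => x ≤ h_) = a.take r := by
    apply List.filter_eq_self.mpr
    intro x hx
    obtain ⟨i, hi, hix⟩ := List.mem_iff_getElem.mp hx
    have hilen : i < a.length := lt_of_lt_of_le (lt_of_lt_of_le hi (by simp)) (le_refl _)
    rw [List.getElem_take] at hix
    simp only [List.length_take] at hi
    subst hix
    exact decide_eq_true (hlow i _ (by omega))
  have hdrop : (a.drop r).filter (fun x => x ≤ h_) = [] := by
    apply List.filter_eq_nil_iff.mpr
    intro x hx
    obtain ⟨i, hi, hix⟩ := List.mem_iff_getElem.mp hx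
    rw [List.getElem_drop] at hix
    subst hix
    simp only [decide_eq_true_eq, not_le]
    exact hhigh (r + i) _ (by omega)
  conv_lhs => rw [hsplit]
  rw [List.filter_append, htake, hdrop, List.append_nil, List.length_take]
  omega

theorem length_filter_le_add_gt (xs : List Int) (h_ : Int) :
    (xs.filter (fun x => x ≤ h_)).length + (xs.filter (fun x => h_ < x)).length = xs.length := by
  induction xs with
  | nil => simp
  | cons x rest ih =>
    by_cases hx : x ≤ h_
    · simp [hx, show ¬ h_ < x from not_lt.mpr hx]; omega
    · simp [hx, show h_ < x from lt_of_not_ge hx]; omega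

-- ===== VERDICT (by name: the statement is the Claim_ definition above) =====
theorem findwidth_spec : Claim_equal_findwidth := by
  intro n h_ _
  unfold Spec_findwidth findwidth findwidth_alt
  set a := PySem.List.sorted n (fun x => x) false with ha
  have hperm : a.Perm n := PySem.List.sorted_perm n (fun x => x) false
  have hpw : a.Pairwise (· ≤ ·) := by
    have := PySem.List.sorted_pairwise n (fun x => x)
    simpa using this
  obtain ⟨hlow, hhigh, hle⟩ :=
    bsLoop_spec a h_ hpw a.length 0 a.length (by omega) (le_refl _) (Nat.zero_le _)
      (by intro j hj hjl; omega) (by intro j hj hjge; omega)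
  have hcount : ((a.filter (fun x => x ≤ h_)).length) = bsLoop a h_ a.length 0 a.length :=
    boundary_filter_len a h_ _ hle hlow hhigh
  have hfa : (a.filter (fun x => x ≤ h_)).length = (n.filter (fun x => x ≤ h_)).length :=
    (hperm.filter _).length_eq
  have hga : (n.filter (fun x => x ≤ h_)).length + (n.filter (fun x => h_ < x)).length = n.length :=
    length_filter_le_add_gt n h_
  have hlen : a.length = n.length := hperm.length_eq
  rw [findwidthLoop_eq]
  simp only []
  rw [← hcount, hfa, hlen]
  omega
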